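-- pv_equiv track=rewrite | github.com/SannanR/tf-ntf-classification | web.py | seqToMat
-- ===== SOURCE A (Python) =====
-- import math
--
-- def seqToMat(seq):
--     encoder = ['X', 'A', 'C', 'D', 'E', 'F', 'G', 'H', 'I', 'K', 'L', 'M', 'N', 'P', 'Q', 'R', 'S', 'T', 'V', 'W', 'Y']
--     len_seq = len(seq)
--     n = int(math.ceil(math.sqrt(len_seq)))
--     seqMat = [[0 for x in range(n)] for y in range(n)]
--     seqiter = 0
--     for i in range(n):
--         for j in range(n):
--             if seqiter < len_seq:
--                 try:
--                     aa = int(encoder.index(seq[seqiter]))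
--                 except ValueError:
--                     exit(0)
--                 else:
--                     seqMat[i][j] = aa
--                 seqiter += 1
--     return seqMat
-- ===== SOURCE B (Python) =====
-- import math
--
-- def seqToMat(seq):
--     encoder = ['X', 'A', 'C', 'D', 'E', 'F', 'G', 'H', 'I', 'K', 'L', 'M', 'N', 'P', 'Q', 'R', 'S', 'T', 'V', 'W', 'Y']
--     flat = []
--     for ch in seq:
--         try:
--             flat.append(encoder.index(ch))
--         except ValueError:
--             exit(0)
--     n = int(math.ceil(math.sqrt(len(seq))))
--     flat += [0] * (n * n - len(flat))
--     return [flat[r * n:(r + 1) * n] for r in range(n)]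
-- ===== Notes on version B (the rewrite author's own statement) =====
-- stated objective: simpler
-- what changed: Replaces A's counter-driven nested in-place fill of a pre-allocated n x n zero matrix by a map-then-reshape decomposition: encode every character once into a flat list, pad with zeros to n*n, and slice it into n rows.
-- outside the precondition, e.g. on seqToMat('AB1'): A raises, B raises
import Mathlib
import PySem

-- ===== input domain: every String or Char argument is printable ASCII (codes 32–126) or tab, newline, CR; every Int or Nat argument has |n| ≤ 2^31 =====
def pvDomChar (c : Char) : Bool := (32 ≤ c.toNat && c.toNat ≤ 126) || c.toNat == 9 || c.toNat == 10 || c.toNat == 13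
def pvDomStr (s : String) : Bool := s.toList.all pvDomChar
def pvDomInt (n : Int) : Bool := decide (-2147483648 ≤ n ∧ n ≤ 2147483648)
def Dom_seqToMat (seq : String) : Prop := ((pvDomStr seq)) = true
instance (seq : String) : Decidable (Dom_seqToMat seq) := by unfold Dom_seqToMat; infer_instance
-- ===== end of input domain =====

-- B replaces A's counter-driven nested in-place fill by a map-then-reshape decomposition
-- (encode each char once, pad with zeros, slice into rows); objective: simpler; same cost.
-- A's exit(0) on a character outside the encoder aborts the process (no return); Pre_ excludes those inputs.


-- ===== PORT A =====
-- the amino-acid encoder list, shared verbatim by both Pythons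
def encList : List Char :=
  ['X', 'A', 'C', 'D', 'E', 'F', 'G', 'H', 'I', 'K', 'L', 'M', 'N', 'P', 'Q', 'R', 'S', 'T', 'V', 'W', 'Y']

-- int(math.ceil(math.sqrt(L))): exact ceiling square root (exact for all lengths the checks use)
def ceilSqrt (L : Nat) : Nat := if Nat.sqrt L * Nat.sqrt L = L then Nat.sqrt L else Nat.sqrt L + 1

-- encoder.index(c); the .getD 0 arm is only reached outside Pre_ (Python exits there)
def encOf (c : Char) : Int := (((PySem.List.index? encList c).getD 0 : Nat) : Int)

def seqToMat (seq : String) : List (List Int) :=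
  let cs := seq.toList
  let lenSeq := cs.length
  let n := ceilSqrt lenSeq
  let init : List (List Int) := (List.range n).map (fun _ => (List.range n).map (fun _ => (0 : Int)))
  -- the nested for-loops carrying (seqMat, seqiter)
  let final := (List.range n).foldl (fun st i =>
      (List.range n).foldl (fun (st : List (List Int) × Nat) j =>
        if st.2 < lenSeq then
          (st.1.modify i (fun row => row.set j (encOf (cs.getD st.2 'X'))), st.2 + 1)
        else st) st) (init, 0)
  final.1

-- ===== PORT B =====
def seqToMat_alt (seq : String) : List (List Int) :=
  let cs := seq.toList
  let flat := cs.map encOf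
  let n := ceilSqrt cs.length
  let flat2 := flat ++ List.replicate (n * n - flat.length) (0 : Int)
  (List.range n).map (fun r => PySem.List.slice flat2 (some ((r * n : Nat) : Int)) (some (((r + 1) * n : Nat) : Int)))

-- ===== PRECONDITION & SPEC =====
-- Pre_ excludes strings containing a character outside the 21-letter encoder: there Python A calls exit(0)
-- (the process terminates without returning a value), and Python B does the same.
def Pre_seqToMat (seq : String) : Prop := (seq.toList.all (fun c => encList.contains c)) = true
instance (seq : String) : Decidable (Pre_seqToMat seq) := by unfold Pre_seqToMat; infer_instance
def pvWitness_seqToMat : String := "ACDKW"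

def Spec_seqToMat (seq : String) (out : List (List Int)) : Prop := out = seqToMat_alt seq
instance (seq : String) (out : List (List Int)) : Decidable (Spec_seqToMat seq out) := by unfold Spec_seqToMat; infer_instance

-- ===== CLAIM (what is proved, stated in full; the proofs are below) =====
def Claim_equal_seqToMat : Prop := ∀ (seq : String), Dom_seqToMat seq → Pre_seqToMat seq → Spec_seqToMat seq (seqToMat seq)

-- ===== LEMMAS AND PROOFS =====

-- target value both ports are proved equal to: cell (i,j) holds the code of character i*n+j (0 past the end)
def tgtRow (cs : List Char) (n i : Nat) : List Int :=
  (List.range n).map (fun j => if i * n + j < cs.length then encOf (cs.getD (i * n + j) 'X') else 0)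

def tgt (cs : List Char) (n : Nat) : List (List Int) := (List.range n).map (fun i => tgtRow cs n i)

theorem len_le_ceilSqrt_sq (L : Nat) : L ≤ ceilSqrt L * ceilSqrt L := by
  unfold ceilSqrt
  split_ifs with h
  · omega
  · have := Nat.lt_succ_sqrt L
    simpa [Nat.succ_eq_add_one] using this.le

-- B's row r is the target row (for r < n, L ≤ n*n)
theorem alt_row_eq (cs : List Char) (n r : Nat) (hr : r < n) (hL : cs.length ≤ n * n) :
    PySem.List.slice (cs.map encOf ++ List.replicate (n * n - cs.length) (0 : Int))
      (some ((r * n : Nat) : Int)) (some (((r + 1) * n : Nat) : Int)) = tgtRow cs n r := by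
  rw [PySem.List.slice_natCast]
  have hsub : (r + 1) * n - r * n = n := by
    have : (r + 1) * n = r * n + n := by ring
    omega
  rw [hsub]
  set L := cs.length with hLdef
  have hlen2 : (cs.map encOf ++ List.replicate (n * n - L) (0 : Int)).length = n * n := by
    simp [hLdef]; omega
  apply List.ext_getElem
  · simp [hlen2, tgtRow]
    have : r * n + n ≤ n * n := by nlinarith
    omega
  · intro j h1 h2
    have hjn : j < n := by
      simp [tgtRow] at h2; exact h2
    rw [List.getElem_take, List.getElem_drop]
    simp only [tgtRow, List.getElem_map, List.getElem_range]
    rw [List.getElem_append]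
    split
    · next hin =>
      have hin' : r * n + j < L := by simpa [hLdef] using hin
      rw [if_pos (by exact hin'), List.getElem_map]
      simp [List.getD_eq_getElem?_getD, List.getElem?_eq_getElem (show r * n + j < cs.length from hin')]
    · next hin =>
      have hin' : ¬ (r * n + j < L) := by simpa [hLdef] using hin
      rw [if_neg (by exact hin'), List.getElem_replicate]

theorem alt_eq_tgt (seq : String) :
    seqToMat_alt seq = tgt seq.toList (ceilSqrt seq.toList.length) := by
  unfold seqToMat_alt tgt
  apply List.map_congr_left
  intro r hr
  rw [List.mem_range] at hr
  rw [List.length_map]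
  exact alt_row_eq _ _ _ hr (len_le_ceilSqrt_sq _)

-- a fold that only modifies row i factors through List.modify
theorem foldl_modify_factor {m i : Nat} (P : Nat → Prop) [DecidablePred P]
    (f : Nat → List Int → List Int) (M0 : List (List Int)) :
    (List.range m).foldl (fun M j => if P j then M.modify i (f j) else M) M0
      = M0.modify i (fun row => (List.range m).foldl (fun r j => if P j then f j r else r) row) := by
  induction m with
  | zero =>
      apply List.ext_getElem
      · simp
      · intro j h1 h2
        simp only [List.getElem_modify]
        split <;> rfl
  | succ m ih =>
      simp only [List.range_succ, List.foldl_append, List.foldl_cons, List.foldl_nil]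
      rw [ih]
      by_cases hP : P m
      · rw [if_pos hP]
        apply List.ext_getElem
        · simp
        · intro j h1 h2
          simp only [List.getElem_modify]
          split <;> simp
      · rw [if_neg hP]
        apply List.ext_getElem
        · simp
        · intro j h1 h2
          simp only [List.getElem_modify]
          split <;> simp

-- successive sets at positions 0..m-1 on a zero row give the target mapped row
theorem fold_set_eq_map (n : Nat) (Q : Nat → Prop) [DecidablePred Q] (v : Nat → Int) :
    ∀ m, m ≤ n →
    (List.range m).foldl (fun r j => if Q j then r.set j (v j) else r) (List.replicate n (0 : Int))
      = (List.range n).map (fun j => if j < m ∧ Q j then v j else 0) := by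
  intro m
  induction m with
  | zero =>
      intro _
      apply List.ext_getElem <;> simp
  | succ m ih =>
      intro hm
      rw [List.range_succ, List.foldl_append, ih (by omega)]
      simp only [List.foldl_cons, List.foldl_nil]
      by_cases hQ : Q m
      · rw [if_pos hQ]
        apply List.ext_getElem
        · simp
        · intro j h1 h2
          simp only [List.getElem_set, List.getElem_map, List.getElem_range]
          split
          · next he => simp [← he, hQ]
          · next he =>
            have : (j < m ∧ Q j) ↔ (j < m + 1 ∧ Q j) := by
              constructor
              · rintro ⟨a, b⟩; exact ⟨by omega, b⟩
              · rintro ⟨a, b⟩; exact ⟨by omega, b⟩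
            simp [this]
      · rw [if_neg hQ]
        apply List.ext_getElem
        · simp
        · intro j h1 h2
          simp only [List.getElem_map, List.getElem_range]
          have : (j < m ∧ Q j) ↔ (j < m + 1 ∧ Q j) := by
            constructor
            · rintro ⟨a, b⟩; exact ⟨by omega, b⟩
            · rintro ⟨a, b⟩; rcases Nat.lt_succ_iff_lt_or_eq.mp a with h | h
              · exact ⟨h, b⟩
              · subst h; exact absurd b hQ
          simp [this]

-- inner loop: from state (mat, c) it writes cells j with c+j < L into row i and saturates the counter
theorem inner_fold (cs : List Char) (i : Nat) :
    ∀ (m : Nat) (mat : List (List Int)) (c : Nat),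
    (List.range m).foldl (fun (st : List (List Int) × Nat) j =>
        if st.2 < cs.length then
          (st.1.modify i (fun row => row.set j (encOf (cs.getD st.2 'X'))), st.2 + 1)
        else st) (mat, c)
      = ((List.range m).foldl (fun M j =>
            if c + j < cs.length then M.modify i (fun row => row.set j (encOf (cs.getD (c + j) 'X'))) else M) mat,
         if c < cs.length then min (c + m) cs.length else c) := by
  intro m
  induction m with
  | zero => intro mat c; simp; omega
  | succ m ih =>
      intro mat c
      rw [List.range_succ, List.foldl_append, List.foldl_append, ih]
      simp only [List.foldl_cons, List.foldl_nil]
      by_cases hc : c < cs.length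
      · by_cases hcm : c + m < cs.length
        · have h1 : min (c + m) cs.length = c + m := by omega
          simp only [h1]
          simp [hcm, hc]
          omega
        · have h1 : min (c + m) cs.length = cs.length := by omega
          simp only [h1]
          simp [hcm, hc]
          omega
      · have hcm : ¬ (c + m < cs.length) := by omega
        simp [hc, hcm]

-- outer loop invariant: after i rows the matrix has rows 0..i-1 filled and the counter is min (i*n) L
theorem outer_fold (cs : List Char) (n : Nat) :
    ∀ i, i ≤ n →
    (List.range i).foldl (fun st r =>
        (List.range n).foldl (fun (st : List (List Int) × Nat) j =>
          if st.2 < cs.length then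
            (st.1.modify r (fun row => row.set j (encOf (cs.getD st.2 'X'))), st.2 + 1)
          else st) st)
      ((List.range n).map (fun _ => (List.range n).map (fun _ => (0 : Int))), 0)
      = ((List.range n).map (fun r => if r < i then tgtRow cs n r else (List.range n).map (fun _ => (0 : Int))),
         min (i * n) cs.length) := by
  intro i
  induction i with
  | zero =>
      intro _
      simp
  | succ i ih =>
      intro hi
      rw [List.range_succ, List.foldl_append, ih (by omega)]
      simp only [List.foldl_cons, List.foldl_nil]
      rw [inner_fold, Prod.mk.injEq]
      constructor
      · -- matrix component
        rw [foldl_modify_factor (P := fun j => min (i * n) cs.length + j < cs.length)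
              (f := fun j row => row.set j (encOf (cs.getD (min (i * n) cs.length + j) 'X')))]
        apply List.ext_getElem
        · simp
        · intro r h1 h2
          simp only [List.getElem_modify, List.getElem_map, List.getElem_range]
          have hrn : r < n := by simpa using h1
          by_cases hri : i = r
          · subst hri
            have hlt : ¬ (i < i) := by omega
            simp only [hlt, Nat.lt_succ_iff, le_refl, if_pos]
            rw [if_neg not_false]
            -- row i: the per-row fold on the zero row gives the target row
            by_cases hL : i * n < cs.length
            · have hmin : min (i * n) cs.length = i * n := by omega
              rw [hmin]
              have : ((List.range n).map (fun _ => (0:Int))) = List.replicate n (0:Int) := by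
                apply List.ext_getElem <;> simp
              rw [this, fold_set_eq_map n (fun j => i * n + j < cs.length)
                    (fun j => encOf (cs.getD (i * n + j) 'X')) n (le_refl n)]
              unfold tgtRow
              apply List.map_congr_left
              intro j hj
              rw [List.mem_range] at hj
              simp [hj]
            · have hmin : min (i * n) cs.length = cs.length := by omega
              rw [hmin]
              have hid : ∀ j : Nat, ¬ (cs.length + j < cs.length) := by omega
              have hfold : (List.range n).foldl
                  (fun r j => if cs.length + j < cs.length then r.set j (encOf (cs.getD (cs.length + j) 'X')) else r)
                  ((List.range n).map (fun _ => (0:Int)))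
                  = (List.range n).map (fun _ => (0:Int)) := by
                apply List.foldl_fixed'
                intro j
                simp [hid j]
              rw [hfold]
              unfold tgtRow
              apply List.map_congr_left
              intro j hj
              have : ¬ (i * n + j < cs.length) := by omega
              simp [this]
          · -- other rows unchanged
            simp only [if_neg hri]
            have : (r < i) ↔ (r < i + 1) := by omega
            simp [this]
      · -- counter component
        by_cases hL : i * n < cs.length
        · have hmin : min (i * n) cs.length = i * n := by omega
          rw [hmin]
          simp only [if_pos hL]
          have : (i + 1) * n = i * n + n := by ring
          omega
        · have hmin : min (i * n) cs.length = cs.length := by omega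
          rw [hmin]
          by_cases hz : cs.length < cs.length
          · omega
          · simp only [if_neg hz]
            have : (i + 1) * n = i * n + n := by ring
            omega

theorem a_eq_tgt (seq : String) :
    seqToMat seq = tgt seq.toList (ceilSqrt seq.toList.length) := by
  unfold seqToMat
  simp only []
  rw [outer_fold seq.toList (ceilSqrt seq.toList.length) (ceilSqrt seq.toList.length) (le_refl _)]
  unfold tgt
  apply List.map_congr_left
  intro r hr
  rw [List.mem_range] at hr
  rw [if_pos hr]

-- ===== VERDICT (by name: the statement is the Claim_ definition above) =====
theorem seqToMat_spec : Claim_equal_seqToMat := by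
  intro seq _ _
  unfold Spec_seqToMat
  rw [a_eq_tgt, alt_eq_tgt]
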